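-- pv_equiv track=rewrite | github.com/j-jae0/Algorithm | 프로그래머스/unrated/135808. 과일 장수/과일 장수.py | solution
-- ===== SOURCE A (Python) =====
-- def solution(k, m, score):
--     score = sorted([s for s in score if s <= k])[::-1]
--     apple_box, box = list(), list()
--
--     if len(score) // m == 1:
--         apple_box = score[:m]
--         return min(apple_box) * m
--
--     for s in score:
--         box.append(s)
--         if len(box) // m == 1:
--             apple_box.append(box)
--             box = []
--     return sum([len(apples) * min(apples) for apples in apple_box])
-- ===== SOURCE B (Python) =====
-- def solution(k, m, score):
--     kept = sorted((s for s in score if s <= k), reverse=True)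
--     num = len(kept) // m
--     return m * sum(kept[(i + 1) * m - 1] for i in range(num))
-- ===== Notes on version B (the rewrite author's own statement) =====
-- stated objective: simpler
-- what changed: B sorts the filtered scores descending once and returns m times the sum of the stride elements kept[(i+1)*m-1] for i < len//m, instead of A's building of explicit box lists with a per-box min and A's redundant len//m==1 special case.
import Mathlib
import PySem

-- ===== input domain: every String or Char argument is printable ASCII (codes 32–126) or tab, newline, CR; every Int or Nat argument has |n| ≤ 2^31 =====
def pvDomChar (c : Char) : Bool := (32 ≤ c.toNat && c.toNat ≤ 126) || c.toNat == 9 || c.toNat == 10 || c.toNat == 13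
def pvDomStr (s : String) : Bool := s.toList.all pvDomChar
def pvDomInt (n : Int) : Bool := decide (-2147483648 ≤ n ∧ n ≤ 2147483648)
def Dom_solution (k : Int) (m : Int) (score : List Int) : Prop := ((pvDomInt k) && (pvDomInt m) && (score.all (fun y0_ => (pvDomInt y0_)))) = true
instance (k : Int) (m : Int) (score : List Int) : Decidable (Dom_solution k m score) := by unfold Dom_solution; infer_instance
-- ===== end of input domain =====

-- B replaces A's per-box list building and per-box min by a single stride-indexed sum over the
-- descending-sorted filtered scores; return values agree on every input with m ≠ 0.

-- ===== PORT A =====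
-- Python min(xs): min? is none exactly on [], which is unreachable at both call sites (boxes have length m ≥ 1)
def pymin (xs : List Int) : Int := (PySem.List.min? xs (fun x => x)).getD 0

-- the body of A's for-loop, acting on the state (apple_box, box)
def stepA (m : Int) (st : List (List Int) × List Int) (s : Int) : List (List Int) × List Int :=
  let box := st.2 ++ [s]
  if PySem.Int.floordiv (box.length : Int) m = 1 then (st.1 ++ [box], []) else (st.1, box)

def solution (k : Int) (m : Int) (score : List Int) : Int :=
  -- score = sorted([s for s in score if s <= k])[::-1]  (slice? with step -1 is total; getD [] unreachable)
  let score' := ((PySem.List.slice? (PySem.List.sorted (score.filter (fun s => decide (s ≤ k))) (fun x => x) false) none none (-1)).getD [])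
  if PySem.Int.floordiv (score'.length : Int) m = 1 then
    let apple_box := PySem.List.slice score' none (some m)
    pymin apple_box * m
  else
    let st := score'.foldl (stepA m) ([], [])
    (st.1.map (fun apples => (apples.length : Int) * pymin apples)).sum

-- ===== PORT B =====
def solution_alt (k : Int) (m : Int) (score : List Int) : Int :=
  let kept := PySem.List.sorted (score.filter (fun s => decide (s ≤ k))) (fun x => x) true
  let num := PySem.Int.floordiv (kept.length : Int) m
  m * ((PySem.List.pyRange 0 num 1).map (fun i => (PySem.List.pyGet? kept ((i + 1) * m - 1)).getD 0)).sum

-- ===== PRECONDITION & SPEC =====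
-- Python A raises ZeroDivisionError iff m = 0 (len(score) // m); B raises there too.
def Pre_solution (k : Int) (m : Int) (score : List Int) : Prop := m ≠ 0
instance (k : Int) (m : Int) (score : List Int) : Decidable (Pre_solution k m score) := by unfold Pre_solution; infer_instance
def pvWitness_solution : Int × Int × List Int := (10, 2, [4, 1, 2, 5, 3])

def Spec_solution (k : Int) (m : Int) (score : List Int) (out : Int) : Prop := out = solution_alt k m score
instance (k : Int) (m : Int) (score : List Int) (out : Int) : Decidable (Spec_solution k m score out) := by unfold Spec_solution; infer_instance

-- ===== CLAIM (what is proved, stated in full; the proofs are below) =====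
def Claim_equal_solution : Prop := ∀ (k : Int) (m : Int) (score : List Int), Dom_solution k m score → Pre_solution k m score → Spec_solution k m score (solution k m score)

-- ===== LEMMAS AND PROOFS =====

-- the boxes A's loop collects: successive blocks of length M, remainder dropped
def chunks (M : Nat) : List Int → List (List Int)
  | L => if h : 0 < M ∧ M ≤ L.length then L.take M :: chunks M (L.drop M) else []
  termination_by L => L.length
  decreasing_by simp only [List.length_drop]; exact Nat.sub_lt (Nat.lt_of_lt_of_le h.1 h.2) h.1

-- descending sort = reverse of ascending sort (identity key)
theorem rev_sorted_id (xs : List Int) :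
    (PySem.List.sorted xs (fun x => x) false).reverse = PySem.List.sorted xs (fun x => x) true := by
  have hperm : ((PySem.List.sorted xs (fun x => x) true).reverse).Perm xs :=
    (List.reverse_perm _).trans (PySem.List.sorted_perm xs (fun x => x) true)
  have hpw : ((PySem.List.sorted xs (fun x => x) true).reverse).Pairwise (· ≤ ·) := by
    rw [List.pairwise_reverse]
    exact PySem.List.sorted_pairwise_rev xs (fun x => x)
  have h := PySem.List.sorted_id_eq_of_perm_of_pairwise xs ((PySem.List.sorted xs (fun x => x) true).reverse) hperm hpw
  rw [h, List.reverse_reverse]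

-- m < 0: the flush condition never fires
theorem foldl_stepA_neg (m : Int) (hm : m < 0) :
    ∀ (L : List Int) (acc : List (List Int)) (b : List Int),
      L.foldl (stepA m) (acc, b) = (acc, b ++ L) := by
  intro L
  induction L with
  | nil => intro acc b; simp
  | cons s L ih =>
    intro acc b
    have hne : PySem.Int.floordiv ((b ++ [s]).length : Int) m ≠ 1 := by
      intro h
      have h1 := PySem.Int.floordiv_mul_add_mod ((b ++ [s]).length : Int) m
      have h2 := PySem.Int.mod_neg_bounds ((b ++ [s]).length : Int) hm
      rw [h] at h1
      simp only [List.length_append, List.length_cons, List.length_nil] at h1 h2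
      omega
    simp only [List.foldl_cons, stepA, if_neg hne]
    rw [ih]
    simp

-- filling a box that will not reach length M
theorem foldl_stepA_fill (M : Nat) :
    ∀ (L : List Int) (b : List Int) (acc : List (List Int)), b.length + L.length < M →
      L.foldl (stepA (M : Int)) (acc, b) = (acc, b ++ L) := by
  intro L
  induction L with
  | nil => intro b acc _; simp
  | cons s L ih =>
    intro b acc h
    have hlen : (b ++ [s]).length < M := by simp at h ⊢; omega
    have hne : PySem.Int.floordiv ((b ++ [s]).length : Int) (M : Int) ≠ 1 := by
      rw [PySem.Int.floordiv_natCast]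
      have : (b ++ [s]).length / M = 0 := Nat.div_eq_of_lt hlen
      rw [this]; decide
    simp only [List.foldl_cons, stepA, if_neg hne]
    rw [ih (b ++ [s]) acc (by simp at h ⊢; omega)]
    simp

-- consuming exactly one full box
theorem foldl_stepA_chunk (M : Nat) :
    ∀ (c b : List Int) (acc : List (List Int)), b.length + c.length = M → c ≠ [] →
      c.foldl (stepA (M : Int)) (acc, b) = (acc ++ [b ++ c], []) := by
  intro c
  induction c with
  | nil => intro b acc _ hne; exact absurd rfl hne
  | cons s c ih =>
    intro b acc h _
    by_cases hc : c = []
    · subst hc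
      have hlen : (b ++ [s]).length = M := by simp at h ⊢; omega
      have hyes : PySem.Int.floordiv ((b ++ [s]).length : Int) (M : Int) = 1 := by
        rw [hlen, PySem.Int.floordiv_natCast, Nat.div_self (by simp at h; omega)]
        rfl
      simp only [List.foldl_cons, stepA, if_pos hyes, List.foldl_nil]
    · have hlt : (b ++ [s]).length < M := by
        have : 0 < c.length := List.length_pos_iff.mpr hc
        simp at h ⊢; omega
      have hne : PySem.Int.floordiv ((b ++ [s]).length : Int) (M : Int) ≠ 1 := by
        rw [PySem.Int.floordiv_natCast, Nat.div_eq_of_lt hlt]; decide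
      simp only [List.foldl_cons, stepA, if_neg hne]
      rw [ih (b ++ [s]) acc (by simp at h ⊢; omega) hc]
      simp

-- the loop collects exactly the chunks
theorem foldl_stepA_chunks (M : Nat) (hM : 0 < M) :
    ∀ (n : Nat) (L : List Int) (acc : List (List Int)), L.length ≤ n →
      (L.foldl (stepA (M : Int)) (acc, [])).1 = acc ++ chunks M L := by
  intro n
  induction n with
  | zero =>
    intro L acc h
    have : L = [] := List.length_eq_zero_iff.mp (Nat.le_zero.mp h)
    subst this
    rw [chunks]
    simp
    omega
  | succ n ih =>
    intro L acc h
    by_cases hle : M ≤ L.length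
    · have hsplit : L = L.take M ++ L.drop M := (List.take_append_drop M L).symm
      conv_lhs => rw [hsplit]
      rw [List.foldl_append]
      rw [foldl_stepA_chunk M (L.take M) [] acc (by simp [Nat.min_eq_left hle]) (by
        intro hnil
        have := congrArg List.length hnil
        simp [Nat.min_eq_left hle] at this
        omega)]
      simp only [List.nil_append]
      rw [ih (L.drop M) (acc ++ [L.take M]) (by simp; omega)]
      conv_rhs => rw [chunks]
      simp [hM, hle]
    · have hlt : L.length < M := Nat.lt_of_not_le hle
      rw [foldl_stepA_fill M L [] acc (by simpa using hlt)]
      rw [chunks]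
      simp [hle]

-- the last element of a descending list is a lower bound
theorem getLast_le_of_desc : ∀ (c : List Int) (hc : c ≠ []), c.Pairwise (fun a b => b ≤ a) →
    ∀ y ∈ c, c.getLast hc ≤ y := by
  intro c
  induction c with
  | nil => intro hc; exact absurd rfl hc
  | cons a c ih =>
    intro _ hd y hy
    rcases List.pairwise_cons.mp hd with ⟨ha, hdc⟩
    by_cases hc : c = []
    · subst hc
      simp at hy
      simp [hy]
    · rw [List.getLast_cons hc]
      rcases List.mem_cons.mp hy with rfl | hyc
      · exact le_trans (ih hc hdc _ (List.getLast_mem hc)) (ha _ (List.getLast_mem hc))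
      · exact ih hc hdc y hyc

-- min of a descending nonempty list is its last element
theorem pymin_desc (c : List Int) (hc : c ≠ []) (hd : c.Pairwise (fun a b => b ≤ a)) :
    pymin c = c.getLast hc := by
  obtain ⟨v, hv⟩ : ∃ v, PySem.List.min? c (fun x => x) = some v := by
    cases h : PySem.List.min? c (fun x => x) with
    | none => exact absurd ((PySem.List.min?_eq_none_iff c (fun x => x)).mp h) hc
    | some v => exact ⟨v, rfl⟩
  have hmem := PySem.List.min?_mem hv
  have hmin := PySem.List.min?_isMin hv
  simp only [pymin, hv, Option.getD_some]
  exact le_antisymm (hmin _ (List.getLast_mem hc)) (getLast_le_of_desc c hc hd v hmem)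

-- min of the first full box is the stride element L[M-1]
theorem pymin_take (M : Nat) (hM : 0 < M) (L : List Int) (hle : M ≤ L.length)
    (hd : L.Pairwise (fun a b => b ≤ a)) :
    pymin (L.take M) = L.getD (M - 1) 0 := by
  have hne : L.take M ≠ [] := by
    intro h
    have := congrArg List.length h
    simp [Nat.min_eq_left hle] at this
    omega
  have hdt : (L.take M).Pairwise (fun a b => b ≤ a) := List.Pairwise.sublist (List.take_sublist M L) hd
  rw [pymin_desc (L.take M) hne hdt]
  have hlen : (L.take M).length = M := by simp [Nat.min_eq_left hle]
  rw [List.getLast_eq_getElem, List.getD_eq_getElem L 0 (by omega)]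
  simp only [hlen]
  rw [List.getElem_take]

-- the chunk sum equals B's stride sum (descending input)
theorem chunks_sum (M : Nat) (hM : 0 < M) :
    ∀ (n : Nat) (L : List Int), L.length ≤ n → L.Pairwise (fun a b => b ≤ a) →
      ((chunks M L).map (fun c => (c.length : Int) * pymin c)).sum
        = (M : Int) * ((List.range (L.length / M)).map (fun j => L.getD ((j + 1) * M - 1) 0)).sum := by
  intro n
  induction n with
  | zero =>
    intro L h _
    have : L = [] := List.length_eq_zero_iff.mp (Nat.le_zero.mp h)
    subst this
    rw [chunks, dif_neg (by omega)]
    simp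
  | succ n ih =>
    intro L h hd
    by_cases hle : M ≤ L.length
    · have hq : L.length / M = (L.length - M) / M + 1 := Nat.div_eq_sub_div hM hle
      rw [chunks, dif_pos ⟨hM, hle⟩]
      have hdrop_pw : (L.drop M).Pairwise (fun a b => b ≤ a) :=
        List.Pairwise.sublist (List.drop_sublist M L) hd
      rw [List.map_cons, List.sum_cons, ih (L.drop M) (by simp; omega) hdrop_pw]
      have hlen_take : (L.take M).length = M := by simp [Nat.min_eq_left hle]
      rw [hlen_take, pymin_take M hM L hle hd]
      have hdroplen : (L.drop M).length = L.length - M := by simp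
      rw [hdroplen, hq, List.range_succ_eq_map, List.map_cons, List.sum_cons, List.map_map]
      have hterm : ∀ j ∈ List.range ((L.length - M) / M),
          ((fun j => L.getD ((j + 1) * M - 1) 0) ∘ Nat.succ) j
            = (L.drop M).getD ((j + 1) * M - 1) 0 := by
        intro j hj
        rw [List.mem_range] at hj
        have h2 : (j + 1) * M ≤ ((L.length - M) / M) * M := Nat.mul_le_mul_right M hj
        have h3 := Nat.div_mul_le_self (L.length - M) M
        have h4 : 1 ≤ (j + 1) * M := Nat.mul_le_mul (Nat.succ_le_succ (Nat.zero_le j)) hM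
        have hidx : (j + 1) * M - 1 < L.length - M := by omega
        have h5 : (Nat.succ j + 1) * M = (j + 1) * M + M := by simp only [Nat.succ_eq_add_one]; ring
        have hEq : (Nat.succ j + 1) * M - 1 = M + ((j + 1) * M - 1) := by omega
        simp only [Function.comp_apply]
        rw [hEq, List.getD_eq_getElem L 0 (by omega), List.getD_eq_getElem _ 0 (by simp; omega)]
        exact List.getElem_drop.symm
      rw [List.map_congr_left hterm]
      have h0 : (0 + 1) * M - 1 = M - 1 := by omega
      rw [h0]
      ring
    · rw [chunks, dif_neg (by omega)]
      rw [Nat.div_eq_of_lt (by omega)]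
      simp

theorem main_eq (k m : Int) (hm : m ≠ 0) (score : List Int) :
    solution k m score = solution_alt k m score := by
  unfold solution solution_alt
  rw [PySem.List.slice?_none_none_neg_one]
  simp only [Option.getD_some]
  rw [rev_sorted_id]
  have hpw : (PySem.List.sorted (score.filter (fun s => decide (s ≤ k))) (fun x => x) true).Pairwise
      (fun a b => b ≤ a) := by
    simpa using PySem.List.sorted_pairwise_rev (score.filter (fun s => decide (s ≤ k))) (fun x => x)
  set L := PySem.List.sorted (score.filter (fun s => decide (s ≤ k))) (fun x => x) true with hLdef
  rcases lt_or_gt_of_ne hm with hneg | hpos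
  · -- m < 0: no box is ever flushed and B's range is empty; both sides are 0
    have h1 := PySem.Int.floordiv_mul_add_mod (L.length : Int) m
    have h2 := PySem.Int.mod_neg_bounds (L.length : Int) hneg
    have hne1 : PySem.Int.floordiv (L.length : Int) m ≠ 1 := by
      intro h
      rw [h] at h1
      omega
    rw [if_neg hne1]
    rw [foldl_stepA_neg m hneg L [] []]
    have hnum : PySem.Int.floordiv (L.length : Int) m ≤ 0 := by
      by_contra hq
      push_neg at hq
      have h3 : (PySem.Int.floordiv (L.length : Int) m - 1) * m ≤ 0 :=
        mul_nonpos_of_nonneg_of_nonpos (by omega) hneg.le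
      nlinarith
    rw [PySem.List.pyRange_one_eq_nil hnum]
    simp
  · -- m > 0
    have hMm : ((m.toNat : Int)) = m := Int.toNat_of_nonneg hpos.le
    set M := m.toNat with hMdef
    have hM : 0 < M := by omega
    have hfd : PySem.Int.floordiv (L.length : Int) m = ((L.length / M : Nat) : Int) := by
      rw [← hMm, PySem.Int.floordiv_natCast]
    set q := L.length / M with hqdef
    have hB : ((PySem.List.pyRange 0 (PySem.Int.floordiv (L.length : Int) m) 1).map
        (fun i => (PySem.List.pyGet? L ((i + 1) * m - 1)).getD 0)).sum
        = ((List.range q).map (fun j => L.getD ((j + 1) * M - 1) 0)).sum := by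
      rw [hfd, PySem.List.pyRange_one]
      simp only [sub_zero, Int.toNat_natCast, List.map_map]
      apply congrArg
      apply List.map_congr_left
      intro j hj
      rw [List.mem_range] at hj
      have h4 : 1 ≤ (j + 1) * M := Nat.mul_le_mul (Nat.succ_le_succ (Nat.zero_le j)) hM
      have hidx : ((0 : Int) + (j : Int) + 1) * m - 1 = (((j + 1) * M - 1 : Nat) : Int) := by
        rw [← hMm, Nat.cast_sub h4]
        push_cast
        ring
      simp only [Function.comp_apply, hidx, PySem.List.pyGet?_natCast]
      rw [List.getD_eq_getElem?_getD]
    by_cases hone : PySem.Int.floordiv (L.length : Int) m = 1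
    · -- A's redundant special case: the single full box
      rw [if_pos hone]
      have hq1 : q = 1 := by
        rw [hfd] at hone
        exact_mod_cast hone
      have hle : M ≤ L.length := by
        by_contra hc
        push_neg at hc
        rw [hqdef, Nat.div_eq_of_lt hc] at hq1
        omega
      rw [PySem.List.slice_to L hpos.le, ← hMdef]
      rw [pymin_take M hM L hle hpw]
      rw [hB, hq1]
      simp
      ring
    · rw [if_neg hone]
      have hrun := foldl_stepA_chunks M hM L.length L [] le_rfl
      rw [hMm] at hrun
      rw [hrun]
      simp only [List.nil_append]
      have hsum := chunks_sum M hM L.length L le_rfl hpw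
      rw [hsum, hB, hMm]

-- ===== VERDICT (by name: the statement is the Claim_ definition above) =====
theorem solution_spec : Claim_equal_solution := by
  intro k m score _ hpre
  unfold Spec_solution
  exact main_eq k m hpre score
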